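-- pv_equiv track=rewrite | github.com/lumisproject/lumis-core | digital-twin/src/tasks_checking.py | clean_diff
-- ===== SOURCE A (Python) =====
-- def clean_diff(raw_diff: str) -> str:
--     """Removes lock files, minified files, and SVG noise from diffs to save LLM tokens."""
--     if not raw_diff: return ""
--
--     ignore_patterns = ['.lock', 'package-lock.json', 'yarn.lock', '.svg', '.min.js', '.map']
--     cleaned_lines = []
--     skip_file = False
--
--     for line in raw_diff.split('\n'):
--         if line.startswith('diff --git'):
--             skip_file = any(ignored in line for ignored in ignore_patterns)
--
--         if not skip_file:
--             # Strip structural diff markers to save a few more tokens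
--             if line.strip() in ['+', '-']: continue
--             cleaned_lines.append(line)
--
--     # Hard cutoff to protect LLM context windows
--     result = '\n'.join(cleaned_lines)
--     return result[:15000] + "\n...[Diff truncated for length]" if len(result) > 15000 else result
-- ===== SOURCE B (Python) =====
-- def _split_blocks(lines):
--     """Split diff lines into blocks: a preamble, then one block per 'diff --git' header."""
--     blocks, cur = [], []
--     for line in lines:
--         if line.startswith('diff --git'):
--             blocks.append(cur)
--             cur = [line]
--         else:
--             cur.append(line)
--     blocks.append(cur)
--     return blocks
--
--
-- def clean_diff(raw_diff: str) -> str: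
--     """Removes lock files, minified files, and SVG noise from diffs to save LLM tokens."""
--     if not raw_diff:
--         return ""
--     ignore_patterns = ['.lock', 'package-lock.json', 'yarn.lock', '.svg', '.min.js', '.map']
--     kept = []
--     for block in _split_blocks(raw_diff.split('\n')):
--         if block and block[0].startswith('diff --git') and any(p in block[0] for p in ignore_patterns):
--             continue  # drop the whole ignored file block
--         kept.extend(l for l in block if l.strip() not in ('+', '-'))
--     result = '\n'.join(kept)
--     if len(result) > 15000:
--         return result[:15000] + "\n...[Diff truncated for length]"
--     return result
-- ===== Notes on version B (the rewrite author's own statement) =====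
-- stated objective: alternative
-- what changed: Replaced the single line loop carrying a skip_file flag by a two-phase decomposition: split the diff into per-file blocks at 'diff --git' headers, drop ignored blocks whole, then filter '+'/'-' lines from the kept blocks.
import Mathlib
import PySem

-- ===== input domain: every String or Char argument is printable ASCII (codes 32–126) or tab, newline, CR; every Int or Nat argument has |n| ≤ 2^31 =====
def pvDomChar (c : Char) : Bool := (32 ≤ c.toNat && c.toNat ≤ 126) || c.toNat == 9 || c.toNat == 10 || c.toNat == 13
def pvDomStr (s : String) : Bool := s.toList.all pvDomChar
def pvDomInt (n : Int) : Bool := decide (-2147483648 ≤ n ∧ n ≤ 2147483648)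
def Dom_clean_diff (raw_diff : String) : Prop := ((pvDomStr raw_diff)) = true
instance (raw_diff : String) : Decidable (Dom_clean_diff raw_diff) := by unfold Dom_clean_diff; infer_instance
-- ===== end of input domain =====

-- B re-decomposes A's single stateful line loop into per-file blocks (split at 'diff --git'
-- headers, drop ignored blocks whole, then filter '+'/'-' lines); same return value ('alternative').

-- ===== PORT A =====
-- the ignore-pattern literal, shared by both ports
def pvIgnorePatterns : List String := [".lock", "package-lock.json", "yarn.lock", ".svg", ".min.js", ".map"]

-- one iteration of A's for-loop: state = (cleaned_lines, skip_file)
def pvStepA (st : List String × Bool) (line : String) : List String × Bool :=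
  let skip := if PySem.Str.startswith line "diff --git"
              then pvIgnorePatterns.any (fun ig => PySem.Str.isIn ig line)
              else st.2
  if !skip then
    if ["+", "-"].contains (PySem.Str.strip line) then (st.1, skip)
    else (st.1 ++ [line], skip)
  else (st.1, skip)

def clean_diff (raw_diff : String) : String :=
  if raw_diff == "" then "" else
  let cleaned_lines := (((PySem.Str.split? raw_diff "\n").getD []).foldl pvStepA ([], false)).1
  let result := PySem.Str.join "\n" cleaned_lines
  if PySem.Str.len result > 15000 then
    PySem.Str.slice result none (some 15000) ++ "\n...[Diff truncated for length]"
  else result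

-- ===== PORT B =====
-- _split_blocks: preamble block, then one block per 'diff --git' header
def pvSplitBlocks (lines : List String) (blocks : List (List String)) (cur : List String) :
    List (List String) :=
  match lines with
  | [] => blocks ++ [cur]
  | l :: ls =>
      if PySem.Str.startswith l "diff --git"
      then pvSplitBlocks ls (blocks ++ [cur]) [l]
      else pvSplitBlocks ls blocks (cur ++ [l])

def pvDropBlock (b : List String) : Bool :=
  match b with
  | [] => false
  | h :: _ => PySem.Str.startswith h "diff --git"
              && pvIgnorePatterns.any (fun ig => PySem.Str.isIn ig h)

def pvKeepLine (l : String) : Bool := !(["+", "-"].contains (PySem.Str.strip l))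

def clean_diff_alt (raw_diff : String) : String :=
  if raw_diff == "" then "" else
  let blocks := pvSplitBlocks ((PySem.Str.split? raw_diff "\n").getD []) [] []
  let kept := blocks.flatMap (fun b => if pvDropBlock b then [] else b.filter pvKeepLine)
  let result := PySem.Str.join "\n" kept
  if PySem.Str.len result > 15000 then
    PySem.Str.slice result none (some 15000) ++ "\n...[Diff truncated for length]"
  else result

-- ===== PRECONDITION & SPEC =====
def Spec_clean_diff (raw_diff : String) (out : String) : Prop := out = clean_diff_alt raw_diff
instance (raw_diff : String) (out : String) : Decidable (Spec_clean_diff raw_diff out) := by unfold Spec_clean_diff; infer_instance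

-- ===== CLAIM (what is proved, stated in full; the proofs are below) =====
def Claim_equal_clean_diff : Prop := ∀ (raw_diff : String), Dom_clean_diff raw_diff → Spec_clean_diff raw_diff (clean_diff raw_diff)

-- ===== LEMMAS AND PROOFS =====

-- the lines a single block contributes to B's output
def pvKeptOf (b : List String) : List String :=
  if pvDropBlock b then [] else b.filter pvKeepLine

def pvFlatKept (bs : List (List String)) : List String := bs.flatMap pvKeptOf

theorem pvFlatKept_append (bs : List (List String)) (b : List String) :
    pvFlatKept (bs ++ [b]) = pvFlatKept bs ++ pvKeptOf b := by
  simp [pvFlatKept]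

theorem pvFilter_single (l : String) :
    List.filter pvKeepLine [l] = if pvKeepLine l then [l] else [] := by
  cases h : pvKeepLine l <;> simp [List.filter, h]

theorem pvDropBlock_append (cur : List String) (l : String)
    (h : PySem.Str.startswith l "diff --git" = false) :
    pvDropBlock (cur ++ [l]) = pvDropBlock cur := by
  cases cur with
  | nil => simp only [List.nil_append, pvDropBlock, h, Bool.false_and]
  | cons c cs => rfl

theorem pvKey (ls : List String) (blocks : List (List String)) (cur : List String) :
    (ls.foldl pvStepA (pvFlatKept blocks ++ pvKeptOf cur, pvDropBlock cur)).1
      = pvFlatKept (pvSplitBlocks ls blocks cur) := by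
  induction ls generalizing blocks cur with
  | nil =>
    rw [List.foldl_nil]
    conv_rhs => rw [pvSplitBlocks]
    rw [pvFlatKept_append]
  | cons l ls ih =>
    have hk : pvKeepLine l = !(["+", "-"].contains (PySem.Str.strip l)) := rfl
    cases hh : PySem.Str.startswith l "diff --git" with
    | true =>
      have hdrop : pvDropBlock [l]
          = pvIgnorePatterns.any (fun ig => PySem.Str.isIn ig l) := by
        show (PySem.Str.startswith l "diff --git"
                && pvIgnorePatterns.any fun ig => PySem.Str.isIn ig l) = _
        rw [hh, Bool.true_and]
      have hstep : pvStepA (pvFlatKept blocks ++ pvKeptOf cur, pvDropBlock cur) l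
          = (pvFlatKept (blocks ++ [cur]) ++ pvKeptOf [l], pvDropBlock [l]) := by
        unfold pvStepA
        rw [if_pos hh, pvFlatKept_append]
        unfold pvKeptOf
        rw [hdrop]
        cases hany : pvIgnorePatterns.any (fun ig => PySem.Str.isIn ig l) with
        | true => simp
        | false =>
          rw [pvFilter_single, hk]
          cases hc : (["+", "-"].contains (PySem.Str.strip l)) <;> simp
      rw [List.foldl_cons, hstep, ih (blocks ++ [cur]) [l]]
      conv_rhs => rw [pvSplitBlocks]
      rw [if_pos hh]
    | false =>
      have hcond : ¬ (PySem.Str.startswith l "diff --git" = true) := by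
        rw [hh]; exact Bool.false_ne_true
      have hstep : pvStepA (pvFlatKept blocks ++ pvKeptOf cur, pvDropBlock cur) l
          = (pvFlatKept blocks ++ pvKeptOf (cur ++ [l]), pvDropBlock (cur ++ [l])) := by
        unfold pvStepA
        rw [if_neg hcond, pvDropBlock_append cur l hh]
        unfold pvKeptOf
        rw [pvDropBlock_append cur l hh]
        cases hd : pvDropBlock cur with
        | true => simp
        | false =>
          rw [List.filter_append, pvFilter_single, hk]
          cases hc : (["+", "-"].contains (PySem.Str.strip l)) <;> simp
      rw [List.foldl_cons, hstep, ih blocks (cur ++ [l])]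
      conv_rhs => rw [pvSplitBlocks]
      rw [if_neg hcond]

theorem pvLines_eq (lines : List String) :
    (lines.foldl pvStepA ([], false)).1
      = (pvSplitBlocks lines [] []).flatMap
          (fun b => if pvDropBlock b then [] else b.filter pvKeepLine) := by
  have h := pvKey lines [] []
  simpa [pvFlatKept, pvKeptOf, pvDropBlock, List.flatMap] using h

-- ===== VERDICT (by name: the statement is the Claim_ definition above) =====
theorem clean_diff_spec : Claim_equal_clean_diff := by
  intro raw_diff _
  unfold Spec_clean_diff clean_diff clean_diff_alt
  cases h : (raw_diff == "")
  · simp only [Bool.false_eq_true, if_false, pvLines_eq]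
  · simp
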